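-- pv_equiv track=rewrite | github.com/lennylv/DGCddG | features_generate/knowledge/SAAMBE-3D_for_34feautres.py | mutation_type
-- ===== SOURCE A (Python) =====
-- def mutation_type(wild,mutation):
--  wild_lists = ['A','F','C','D','N','E','Q','G','H','L','I','K','M','P','R','S','T','V','W','Y']
--  mutation_lists = ['A','F','C','D','N','E','Q','G','H','L','I','K','M','P','R','S','T','V','W','Y']
--  label_1=0
--  label_2=0
--  for i in wild_lists:
--   for j in mutation_lists:
--    if i != j:
--     label_1 += 1
--     if wild == i:
--      if mutation == j and i != j:
--       label_2 = label_1
--       break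
--  return label_2
-- ===== SOURCE B (Python) =====
-- AA = ['A','F','C','D','N','E','Q','G','H','L','I','K','M','P','R','S','T','V','W','Y']
--
-- def mutation_type(wild, mutation):
--     if wild not in AA or mutation not in AA or wild == mutation:
--         return 0
--     wi = AA.index(wild)
--     mi = AA.index(mutation)
--     return wi * 19 + mi + (1 if wi > mi else 0)
-- ===== Notes on version B (the rewrite author's own statement) =====
-- stated objective: simpler
-- what changed: Replaces the nested 20x20 incrementing scan with membership checks plus a closed-form off-diagonal index wi*19 + mi + (1 if wi > mi else 0) from the two letters' list positions.
import Mathlib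
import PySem

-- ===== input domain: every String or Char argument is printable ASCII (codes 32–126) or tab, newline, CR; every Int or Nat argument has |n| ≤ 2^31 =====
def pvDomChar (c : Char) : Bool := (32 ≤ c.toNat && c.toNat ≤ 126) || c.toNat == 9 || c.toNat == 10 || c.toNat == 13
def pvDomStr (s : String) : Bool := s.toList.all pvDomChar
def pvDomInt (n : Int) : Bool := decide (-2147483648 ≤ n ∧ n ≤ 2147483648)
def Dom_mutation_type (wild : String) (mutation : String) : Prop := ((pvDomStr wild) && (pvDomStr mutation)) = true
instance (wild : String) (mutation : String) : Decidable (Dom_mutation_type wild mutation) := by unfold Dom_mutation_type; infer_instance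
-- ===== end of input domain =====

-- B replaces A's 20x20 counting scan with a direct closed-form index computed from the two letters' positions (objective: simpler).


-- ===== PORT A =====
def pvWildLists : List String := ["A","F","C","D","N","E","Q","G","H","L","I","K","M","P","R","S","T","V","W","Y"]
def pvMutLists : List String := ["A","F","C","D","N","E","Q","G","H","L","I","K","M","P","R","S","T","V","W","Y"]

-- inner 'for j' loop over mutation_lists; the 'break' is the early return of the state pair (label_1, label_2)
def pvInner (wild mutation i : String) : List String → Int → Int → Int × Int
  | [], l1, l2 => (l1, l2)
  | j :: js, l1, l2 =>
    if i != j then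
      let l1' := l1 + 1
      if wild == i then
        if mutation == j && i != j then (l1', l1')
        else pvInner wild mutation i js l1' l2
      else pvInner wild mutation i js l1' l2
    else pvInner wild mutation i js l1 l2

-- outer 'for i' loop over wild_lists threading (label_1, label_2)
def pvOuter (wild mutation : String) : List String → Int → Int → Int
  | [], _, l2 => l2
  | i :: is, l1, l2 =>
    let r := pvInner wild mutation i pvMutLists l1 l2
    pvOuter wild mutation is r.1 r.2

def mutation_type (wild : String) (mutation : String) : Int :=
  pvOuter wild mutation pvWildLists 0 0

-- ===== PORT B =====
def pvAA : List String := ["A","F","C","D","N","E","Q","G","H","L","I","K","M","P","R","S","T","V","W","Y"]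

def mutation_type_alt (wild : String) (mutation : String) : Int :=
  if wild ∉ pvAA ∨ mutation ∉ pvAA ∨ wild = mutation then 0
  else
    let wi : Int := ((PySem.List.index? pvAA wild).getD 0 : Nat)
    let mi : Int := ((PySem.List.index? pvAA mutation).getD 0 : Nat)
    wi * 19 + mi + (if wi > mi then 1 else 0)

-- ===== PRECONDITION & SPEC =====
def Spec_mutation_type (wild : String) (mutation : String) (out : Int) : Prop := out = mutation_type_alt wild mutation
instance (wild : String) (mutation : String) (out : Int) : Decidable (Spec_mutation_type wild mutation out) := by unfold Spec_mutation_type; infer_instance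

-- ===== CLAIM (what is proved, stated in full; the proofs are below) =====
def Claim_equal_mutation_type : Prop := ∀ (wild : String) (mutation : String), Dom_mutation_type wild mutation → Spec_mutation_type wild mutation (mutation_type wild mutation)

-- ===== LEMMAS AND PROOFS =====

-- number of j in js with i ≠ j (label_1 increment of a row that is not the wild row)
def pvCnt (i : String) : List String → Int
  | [] => 0
  | j :: js => (if i != j then 1 else 0) + pvCnt i js

-- label_1 increment of the wild row up to and including the break at mutation
def pvUpto (wild mutation : String) : List String → Int
  | [] => 0
  | j :: js => if mutation = j then 1 else if wild = j then pvUpto wild mutation js else 1 + pvUpto wild mutation js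

-- sum of pvCnt over the rows strictly before the wild row
def pvSumPre (wild : String) : List String → Int
  | [] => 0
  | i :: is => if wild = i then 0 else pvCnt i pvMutLists + pvSumPre wild is

-- a row that cannot break leaves label_2 untouched
theorem pvInner_snd (wild mutation i : String) (js : List String) (l1 l2 : Int)
    (h : wild ≠ i ∨ mutation ∉ js ∨ wild = mutation) : (pvInner wild mutation i js l1 l2).2 = l2 := by
  induction js generalizing l1 with
  | nil => rfl
  | cons j js ih =>
    have hrec : wild ≠ i ∨ mutation ∉ js ∨ wild = mutation := by
      rcases h with h | h | h
      · exact Or.inl h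
      · exact Or.inr (Or.inl (fun hm => h (List.mem_cons_of_mem _ hm)))
      · exact Or.inr (Or.inr h)
    simp only [pvInner]
    by_cases hij : (i != j) = true
    · simp only [hij, if_pos]
      by_cases hwi : (wild == i) = true
      · have hwi' : wild = i := by simpa using hwi
        have hmj : (mutation == j) = false := by
          simp only [beq_eq_false_iff_ne]
          intro hEq
          rcases h with h | h | h
          · exact h hwi'
          · exact h (hEq ▸ List.mem_cons_self)
          · rw [bne_iff_ne] at hij
            exact hij (hwi' ▸ h ▸ hEq)
        simp [hwi, hmj, ih _ hrec]
      · simp [hwi, ih _ hrec]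
    · simp [hij, ih _ hrec]

-- rows that cannot break leave label_2 untouched
theorem pvOuter_eq (wild mutation : String) (is : List String) (l1 l2 : Int)
    (h : ∀ i ∈ is, wild ≠ i ∨ mutation ∉ pvMutLists ∨ wild = mutation) :
    pvOuter wild mutation is l1 l2 = l2 := by
  induction is generalizing l1 l2 with
  | nil => rfl
  | cons i is ih =>
    simp only [pvOuter]
    rw [pvInner_snd wild mutation i pvMutLists l1 l2 (h i List.mem_cons_self)]
    exact ih _ _ (fun i' hi' => h i' (List.mem_cons_of_mem _ hi'))

-- a non-wild row adds pvCnt to label_1 and keeps label_2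
theorem pvInner_no_wild (wild mutation i : String) (js : List String) (l1 l2 : Int)
    (h : wild ≠ i) : pvInner wild mutation i js l1 l2 = (l1 + pvCnt i js, l2) := by
  induction js generalizing l1 with
  | nil => simp [pvInner, pvCnt]
  | cons j js ih =>
    have hwi : (wild == i) = false := by simpa using h
    simp only [pvInner, pvCnt]
    by_cases hij : (i != j) = true
    · simp only [hij, if_pos, hwi, Bool.false_eq_true, if_false, ih]
      ring_nf
    · simp only [hij, ih]
      simp at hij
      simp [hij]

-- the wild row breaks at mutation: both labels become label_1 + pvUpto
theorem pvInner_wild (wild mutation : String) (js : List String) (l1 l2 : Int)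
    (hne : wild ≠ mutation) (hm : mutation ∈ js) :
    pvInner wild mutation wild js l1 l2 = (l1 + pvUpto wild mutation js, l1 + pvUpto wild mutation js) := by
  induction js generalizing l1 with
  | nil => cases hm
  | cons j js ih =>
    simp only [pvInner, pvUpto]
    by_cases hmj : mutation = j
    · have hwj : wild ≠ j := fun hEq => hne (hEq.trans hmj.symm)
      have h1 : (wild != j) = true := by simpa using hwj
      have h2 : (mutation == j) = true := by simpa using hmj
      simp [h1, hmj]
    · have hm' : mutation ∈ js := by
        rcases List.mem_cons.mp hm with h | h
        · exact absurd h hmj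
        · exact h
      by_cases hwj : wild = j
      · have h1 : (wild != j) = false := by simpa using hwj
        simp only [h1, Bool.false_eq_true, if_false, if_neg hmj, if_pos hwj]
        exact ih _ hm'
      · have h1 : (wild != j) = true := by simpa using hwj
        have h2 : (mutation == j) = false := by simpa using hmj
        simp only [h1, if_pos, beq_self_eq_true, h2, Bool.false_and,
          Bool.false_eq_true, if_false, ih _ hm', if_neg hmj, if_neg hwj, Prod.mk.injEq]
        constructor <;> ring
-- full outer loop when both letters occur and differ
theorem pvOuter_mem (wild mutation : String) (hne : wild ≠ mutation) (hm : mutation ∈ pvMutLists)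
    (is : List String) (l1 l2 : Int) (hnd : is.Nodup) (hw : wild ∈ is) :
    pvOuter wild mutation is l1 l2 = l1 + pvSumPre wild is + pvUpto wild mutation pvMutLists := by
  induction is generalizing l1 l2 with
  | nil => cases hw
  | cons i is ih =>
    have hnd' := List.nodup_cons.mp hnd
    simp only [pvOuter, pvSumPre]
    by_cases hwi : wild = i
    · subst hwi
      rw [pvInner_wild wild mutation pvMutLists l1 l2 hne hm]
      rw [pvOuter_eq wild mutation is _ _ (fun i' hi' => Or.inl (fun hEq => hnd'.1 (hEq ▸ hi')))]
      simp
    · have hw' : wild ∈ is := by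
        rcases List.mem_cons.mp hw with h | h
        · exact absurd h hwi
        · exact h
      rw [pvInner_no_wild wild mutation i pvMutLists l1 l2 hwi]
      rw [ih _ _ hnd'.2 hw']
      simp [if_neg hwi]
      ring

-- the 400 in-list cases, each reduced to cheap closed arithmetic
theorem pvKey : ∀ wild ∈ pvAA, ∀ mutation ∈ pvAA, wild ≠ mutation →
    (0 : Int) + pvSumPre wild pvWildLists + pvUpto wild mutation pvMutLists = mutation_type_alt wild mutation := by
  decide

-- ===== VERDICT (by name: the statement is the Claim_ definition above) =====
theorem mutation_type_spec : Claim_equal_mutation_type := by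
  intro wild mutation _
  unfold Spec_mutation_type
  by_cases hw : wild ∈ pvAA
  · by_cases hm : mutation ∈ pvAA
    · by_cases hne : wild = mutation
      · rw [mutation_type, pvOuter_eq wild mutation _ _ _ (fun i _ => Or.inr (Or.inr hne))]
        simp [mutation_type_alt, hne]
      · rw [mutation_type, pvOuter_mem wild mutation hne hm pvWildLists 0 0 (by decide) hw]
        exact pvKey wild hw mutation hm hne
    · have hm' : mutation ∉ pvMutLists := hm
      rw [mutation_type, pvOuter_eq wild mutation _ _ _ (fun i _ => Or.inr (Or.inl hm'))]
      simp [mutation_type_alt, hm]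
  · have : ∀ i ∈ pvWildLists, wild ≠ i ∨ mutation ∉ pvMutLists ∨ wild = mutation := by
      intro i hi
      exact Or.inl (fun hEq => hw (hEq ▸ hi))
    rw [mutation_type, pvOuter_eq wild mutation _ _ _ this]
    simp [mutation_type_alt, hw]
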